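-- pv_equiv track=rewrite | github.com/Dakshh1012/cns | 02_monoalphabetic_cipher.py | decrypt_monoalphabetic
-- ===== SOURCE A (Python) =====
-- def decrypt_monoalphabetic(text, key):
--     """Decrypt using monoalphabetic cipher
--     Reverse the key mapping
--     """
--     reverse_key = {v: k for k, v in key.items()}
--     result = ""
--     for char in text:
--         if char.isalpha():
--             if char.isupper():
--                 result += reverse_key.get(char.lower(), char).upper()
--             else:
--                 result += reverse_key.get(char, char)
--         else:
--             result += char
--     return result
-- ===== SOURCE B (Python) =====
-- def decrypt_monoalphabetic(text, key):
--     table = {}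
--     for plain, cipher in key.items():
--         if len(cipher) == 1 and 'a' <= cipher <= 'z':
--             table[ord(cipher)] = plain
--             table[ord(cipher.upper())] = plain.upper()
--     return text.translate(table)
-- ===== Notes on version B (the rewrite author's own statement) =====
-- stated objective: faster
-- what changed: Replaces the per-character loop with isalpha/isupper branching and string concatenation by a precomputed ordinal-keyed translation table (both case variants inserted) and a single str.translate pass.
import Mathlib
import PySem

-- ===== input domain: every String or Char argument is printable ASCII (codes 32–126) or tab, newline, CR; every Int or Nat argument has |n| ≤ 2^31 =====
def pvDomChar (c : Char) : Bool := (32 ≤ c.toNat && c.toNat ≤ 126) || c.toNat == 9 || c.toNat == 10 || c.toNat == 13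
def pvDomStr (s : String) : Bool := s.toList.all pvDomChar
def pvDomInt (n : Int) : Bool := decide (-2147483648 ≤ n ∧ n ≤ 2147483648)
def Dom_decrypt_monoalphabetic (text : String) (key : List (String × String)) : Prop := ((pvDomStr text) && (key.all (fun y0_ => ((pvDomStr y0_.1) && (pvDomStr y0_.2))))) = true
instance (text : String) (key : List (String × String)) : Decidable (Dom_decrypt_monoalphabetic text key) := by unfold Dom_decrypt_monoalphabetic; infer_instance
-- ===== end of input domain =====

-- B replaces A's per-character isalpha/isupper branching by a precomputed ordinal-keyed
-- translation table (both case variants inserted) and one translate pass (measured faster).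

-- ===== PORT A =====
def decrypt_monoalphabetic (text : String) (key : List (String × String)) : String :=
  let reverse_key : PySem.Dict String String :=
    key.foldl (fun d kv => d.insert kv.2 kv.1) PySem.Dict.empty
  text.toList.foldl (fun result char =>
    if PySem.Chars.isalpha char then
      if PySem.Chars.isupper char then
        result ++ PySem.Str.upper (reverse_key.getD (String.ofList [PySem.Chars.lowerChar char]) (String.ofList [char]))
      else
        result ++ reverse_key.getD (String.ofList [char]) (String.ofList [char])
    else
      result ++ String.ofList [char]) ""

-- ===== PORT B =====
-- B's "len(cipher) == 1 and 'a' <= cipher <= 'z'" : on a length-1 string the string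
-- comparison is exactly the code-point comparison on its single character.
def decrypt_monoalphabetic_alt (text : String) (key : List (String × String)) : String :=
  let table : PySem.Dict Int String :=
    key.foldl (fun t kv =>
      match kv.2.toList with
      | [c] =>
        if 'a' ≤ c ∧ c ≤ 'z' then
          (t.insert (Int.ofNat c.toNat) kv.1).insert
            (Int.ofNat (PySem.Chars.upperChar c).toNat) (PySem.Str.upper kv.1)
        else t
      | _ => t) PySem.Dict.empty
  -- str.translate: each char is replaced by its table entry, unmapped chars pass through
  String.join (text.toList.map (fun c => table.getD (Int.ofNat c.toNat) (String.ofList [c])))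

-- ===== PRECONDITION & SPEC =====
def Spec_decrypt_monoalphabetic (text : String) (key : List (String × String)) (out : String) : Prop := out = decrypt_monoalphabetic_alt text key
instance (text : String) (key : List (String × String)) (out : String) : Decidable (Spec_decrypt_monoalphabetic text key out) := by unfold Spec_decrypt_monoalphabetic; infer_instance

-- ===== CLAIM (what is proved, stated in full; the proofs are below) =====
def Claim_equal_decrypt_monoalphabetic : Prop := ∀ (text : String) (key : List (String × String)), Dom_decrypt_monoalphabetic text key → Spec_decrypt_monoalphabetic text key (decrypt_monoalphabetic text key)

-- ===== LEMMAS AND PROOFS =====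

-- per-character output of A, given A's reverse dictionary
def pvFA (d : PySem.Dict String String) (c : Char) : String :=
  if PySem.Chars.isalpha c then
    if PySem.Chars.isupper c then
      PySem.Str.upper (d.getD (String.ofList [PySem.Chars.lowerChar c]) (String.ofList [c]))
    else
      d.getD (String.ofList [c]) (String.ofList [c])
  else
    String.ofList [c]

-- per-character output of B, given B's translation table
def pvFB (t : PySem.Dict Int String) (c : Char) : String :=
  t.getD (Int.ofNat c.toNat) (String.ofList [c])

theorem char_eq_of_toNat {a b : Char} (h : a.toNat = b.toNat) : a = b :=
  Char.ext (UInt32.toNat_inj.mp h)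

theorem isupper_iff (c : Char) : PySem.Chars.isupper c = true ↔ 65 ≤ c.toNat ∧ c.toNat ≤ 90 := by
  simp only [PySem.Chars.isupper, Bool.and_eq_true, decide_eq_true_eq]
  constructor
  · rintro ⟨h1, h2⟩; exact ⟨Fin.mk_le_mk.mp h1, Fin.mk_le_mk.mp h2⟩
  · rintro ⟨h1, h2⟩; exact ⟨Fin.mk_le_mk.mpr h1, Fin.mk_le_mk.mpr h2⟩

theorem islower_iff (c : Char) : PySem.Chars.islower c = true ↔ 97 ≤ c.toNat ∧ c.toNat ≤ 122 := by
  simp only [PySem.Chars.islower, Bool.and_eq_true, decide_eq_true_eq]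
  constructor
  · rintro ⟨h1, h2⟩; exact ⟨Fin.mk_le_mk.mp h1, Fin.mk_le_mk.mp h2⟩
  · rintro ⟨h1, h2⟩; exact ⟨Fin.mk_le_mk.mpr h1, Fin.mk_le_mk.mpr h2⟩

theorem isalpha_iff (c : Char) : PySem.Chars.isalpha c = true ↔
    (65 ≤ c.toNat ∧ c.toNat ≤ 90) ∨ (97 ≤ c.toNat ∧ c.toNat ≤ 122) := by
  simp only [PySem.Chars.isalpha, Bool.or_eq_true, isupper_iff, islower_iff]

theorem toNat_upperChar {ch : Char} (h : 97 ≤ ch.toNat ∧ ch.toNat ≤ 122) :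
    (PySem.Chars.upperChar ch).toNat = ch.toNat - 32 := by
  rw [PySem.Chars.upperChar, if_pos (islower_iff ch |>.mpr h), Char.toNat_ofNat,
    if_pos (Or.inl (by omega))]

theorem toNat_lowerChar {c : Char} (h : 65 ≤ c.toNat ∧ c.toNat ≤ 90) :
    (PySem.Chars.lowerChar c).toNat = c.toNat + 32 := by
  rw [PySem.Chars.lowerChar, if_pos (isupper_iff c |>.mpr h), Char.toNat_ofNat,
    if_pos (Or.inl (by omega))]

theorem upperChar_of_upper {c : Char} (h : PySem.Chars.isupper c = true) :
    PySem.Chars.upperChar c = c := by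
  rw [PySem.Chars.upperChar, if_neg]
  intro hl
  have h1 := (isupper_iff c).mp h
  have h2 := (islower_iff c).mp hl
  omega

theorem ofList_singleton_eq_iff {a b : Char} : String.ofList [a] = String.ofList [b] ↔ a = b := by
  constructor
  · intro h
    have := congrArg String.toList h
    simpa using this
  · intro h; rw [h]

theorem pvStr_upper_singleton (c : Char) :
    PySem.Str.upper (String.ofList [c]) = String.ofList [PySem.Chars.upperChar c] := by
  simp [PySem.Str.upper, PySem.Chars.upper]

-- the invariant holds for the empty dictionaries
theorem pvBase (c : Char) : pvFA PySem.Dict.empty c = pvFB PySem.Dict.empty c := by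
  unfold pvFA pvFB
  split_ifs with ha hu
  · rw [PySem.Dict.getD_empty, PySem.Dict.getD_empty, pvStr_upper_singleton,
      upperChar_of_upper hu]
  · rw [PySem.Dict.getD_empty, PySem.Dict.getD_empty]
  · rw [PySem.Dict.getD_empty]

theorem ofNat_ne_ofNat {a b : Nat} (h : a ≠ b) : (Int.ofNat a : Int) ≠ Int.ofNat b := by
  intro hh; exact h (Int.ofNat.inj hh)

-- one key entry preserves the per-character invariant
theorem pvStep (d : PySem.Dict String String) (t : PySem.Dict Int String)
    (plain cipher : String)
    (h : ∀ c, pvFA d c = pvFB t c) (c : Char) :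
    pvFA (d.insert cipher plain) c
      = pvFB (match cipher.toList with
              | [ch] =>
                if 'a' ≤ ch ∧ ch ≤ 'z' then
                  (t.insert (Int.ofNat ch.toNat) plain).insert
                    (Int.ofNat (PySem.Chars.upperChar ch).toNat) (PySem.Str.upper plain)
                else t
              | _ => t) c := by
  -- first: if cipher is not a single lowercase letter, the insert into d is never consulted
  have irrelevant : (∀ ch : Char, 97 ≤ ch.toNat → ch.toNat ≤ 122 → cipher ≠ String.ofList [ch]) →
      pvFA (d.insert cipher plain) c = pvFA d c := by
    intro hno
    unfold pvFA
    split_ifs with ha hu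
    · rw [PySem.Dict.getD_insert_of_ne]
      intro he
      have hup := (isupper_iff c).mp hu
      have hl := toNat_lowerChar hup
      exact hno (PySem.Chars.lowerChar c) (by omega) (by omega) he.symm
    · rw [PySem.Dict.getD_insert_of_ne]
      intro he
      have hlo : PySem.Chars.islower c = true := by
        rcases (Bool.or_eq_true _ _).mp (by simpa [PySem.Chars.isalpha] using ha) with h' | h'
        · exact absurd h' hu
        · exact h'
      have hlo' := (islower_iff c).mp hlo
      exact hno c (by omega) (by omega) he.symm
    · rfl
  rcases hcl : cipher.toList with _ | ⟨ch, rest⟩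
  · rw [irrelevant (fun ch _ _ he => by simp [he] at hcl), h c]
  · rcases rest with _ | ⟨c2, rest⟩
    · -- cipher = single char ch
      have hcip : cipher = String.ofList [ch] := by
        rw [← String.toList_inj, hcl]; simp
      change pvFA (d.insert cipher plain) c
        = pvFB (if 'a' ≤ ch ∧ ch ≤ 'z' then
            (t.insert (Int.ofNat ch.toNat) plain).insert
              (Int.ofNat (PySem.Chars.upperChar ch).toNat) (PySem.Str.upper plain)
          else t) c
      by_cases hz : 'a' ≤ ch ∧ ch ≤ 'z'
      · rw [if_pos hz]
        have hzn : 97 ≤ ch.toNat ∧ ch.toNat ≤ 122 :=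
          ⟨Fin.mk_le_mk.mp hz.1, Fin.mk_le_mk.mp hz.2⟩
        have hu := toNat_upperChar hzn
        unfold pvFA pvFB
        split_ifs with ha hup
        · -- c is an uppercase letter
          have hun := (isupper_iff c).mp hup
          have hlc := toNat_lowerChar hun
          by_cases he : c.toNat = ch.toNat - 32
          · -- c is exactly upperChar ch
            have h1 : String.ofList [PySem.Chars.lowerChar c] = cipher := by
              rw [hcip, ofList_singleton_eq_iff]
              exact char_eq_of_toNat (by omega)
            rw [h1, PySem.Dict.getD_insert_self]
            have h2 : (Int.ofNat c.toNat : Int) = Int.ofNat (PySem.Chars.upperChar ch).toNat := by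
              rw [hu]; exact_mod_cast congrArg Int.ofNat he
            rw [h2, PySem.Dict.getD_insert_self]
          · rw [PySem.Dict.getD_insert_of_ne _ _ _ (by
                rw [hcip, Ne, ofList_singleton_eq_iff]
                intro hx
                have := congrArg Char.toNat hx
                omega),
              PySem.Dict.getD_insert_of_ne _ _ _ (ofNat_ne_ofNat (by omega)),
              PySem.Dict.getD_insert_of_ne _ _ _ (ofNat_ne_ofNat (by omega))]
            have := h c
            unfold pvFA pvFB at this
            rw [if_pos ha, if_pos hup] at this
            exact this
        · -- c is a lowercase letter
          have hlo : PySem.Chars.islower c = true := by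
            rcases (Bool.or_eq_true _ _).mp (by simpa [PySem.Chars.isalpha] using ha) with h' | h'
            · exact absurd h' hup
            · exact h'
          have hln := (islower_iff c).mp hlo
          by_cases he : c = ch
          · subst he
            rw [hcip, PySem.Dict.getD_insert_self,
              PySem.Dict.getD_insert_of_ne _ _ _ (ofNat_ne_ofNat (by omega)),
              PySem.Dict.getD_insert_self]
          · rw [PySem.Dict.getD_insert_of_ne _ _ _ (by
                rw [hcip, Ne, ofList_singleton_eq_iff]; exact he),
              PySem.Dict.getD_insert_of_ne _ _ _ (ofNat_ne_ofNat (by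
                intro hx
                have hx2 : c.toNat = ch.toNat - 32 := hu ▸ hx
                omega)),
              PySem.Dict.getD_insert_of_ne _ _ _ (ofNat_ne_ofNat (fun hx => he (char_eq_of_toNat hx)))]
            have := h c
            unfold pvFA pvFB at this
            rw [if_pos ha, if_neg hup] at this
            exact this
        · -- c is not a letter: neither table key can be hit
          have hna : ¬ ((65 ≤ c.toNat ∧ c.toNat ≤ 90) ∨ (97 ≤ c.toNat ∧ c.toNat ≤ 122)) := by
            intro hx; exact ha ((isalpha_iff c).mpr hx)
          rw [PySem.Dict.getD_insert_of_ne _ _ _ (ofNat_ne_ofNat (by omega)),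
            PySem.Dict.getD_insert_of_ne _ _ _ (ofNat_ne_ofNat (by omega))]
          have := h c
          unfold pvFA pvFB at this
          rw [if_neg ha] at this
          exact this
      · rw [if_neg hz]
        rw [irrelevant, h c]
        intro x hx1 hx2 he
        rw [hcip, ofList_singleton_eq_iff] at he
        subst he
        exact hz ⟨Fin.mk_le_mk.mpr hx1, Fin.mk_le_mk.mpr hx2⟩
    · rw [irrelevant (fun x _ _ he => by simp [he] at hcl), h c]

-- the invariant is preserved through the whole build of both dictionaries
theorem pvBuild (key : List (String × String)) :
    ∀ (d : PySem.Dict String String) (t : PySem.Dict Int String),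
    (∀ c, pvFA d c = pvFB t c) →
    ∀ c, pvFA (key.foldl (fun d kv => d.insert kv.2 kv.1) d) c
       = pvFB (key.foldl (fun t kv =>
            match kv.2.toList with
            | [ch] =>
              if 'a' ≤ ch ∧ ch ≤ 'z' then
                (t.insert (Int.ofNat ch.toNat) kv.1).insert
                  (Int.ofNat (PySem.Chars.upperChar ch).toNat) (PySem.Str.upper kv.1)
              else t
            | _ => t) t) c := by
  induction key with
  | nil => intro d t h c; exact h c
  | cons kv key ih =>
    intro d t h c
    rw [List.foldl_cons, List.foldl_cons]
    exact ih _ _ (fun c' => pvStep d t kv.1 kv.2 h c') c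

-- a string-append accumulation loop is the join of the per-element pieces
theorem foldl_append_join' (xs : List String) (s : String) :
    xs.foldl (· ++ ·) s = s ++ String.join xs := by
  induction xs generalizing s with
  | nil => simp [String.join]
  | cons x xs ih =>
    rw [List.foldl_cons, ih]
    have hj : String.join (x :: xs) = x ++ String.join xs := by
      show List.foldl (fun r s => r ++ s) "" (x :: xs) = _
      rw [List.foldl_cons]
      have h2 := ih ("" ++ x)
      simpa using h2
    rw [hj, String.append_assoc]

theorem join_cons (x : String) (xs : List String) :
    String.join (x :: xs) = x ++ String.join xs := by
  show List.foldl (fun r s => r ++ s) "" (x :: xs) = _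
  rw [List.foldl_cons]
  have h2 := foldl_append_join' xs ("" ++ x)
  simpa using h2

theorem foldl_append_join (f : Char → String) (l : List Char) (s : String) :
    l.foldl (fun r c => r ++ f c) s = s ++ String.join (l.map f) := by
  induction l generalizing s with
  | nil => simp [String.join]
  | cons c l ih =>
    rw [List.foldl_cons, ih, List.map_cons, join_cons, String.append_assoc]

theorem A_eq_join (text : String) (key : List (String × String)) :
    decrypt_monoalphabetic text key
      = String.join (text.toList.map (pvFA (key.foldl (fun d kv => d.insert kv.2 kv.1) PySem.Dict.empty))) := by
  unfold decrypt_monoalphabetic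
  have hbody : (fun (result : String) (char : Char) =>
      if PySem.Chars.isalpha char then
        if PySem.Chars.isupper char then
          result ++ PySem.Str.upper ((key.foldl (fun d kv => d.insert kv.2 kv.1) PySem.Dict.empty).getD (String.ofList [PySem.Chars.lowerChar char]) (String.ofList [char]))
        else
          result ++ (key.foldl (fun d kv => d.insert kv.2 kv.1) PySem.Dict.empty).getD (String.ofList [char]) (String.ofList [char])
      else
        result ++ String.ofList [char])
      = fun r c => r ++ pvFA (key.foldl (fun d kv => d.insert kv.2 kv.1) PySem.Dict.empty) c := by
    funext r c
    unfold pvFA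
    split_ifs <;> rfl
  show text.toList.foldl _ "" = _
  rw [hbody, foldl_append_join]
  rfl

-- ===== VERDICT (by name: the statement is the Claim_ definition above) =====
theorem decrypt_monoalphabetic_spec : Claim_equal_decrypt_monoalphabetic := by
  intro text key _
  unfold Spec_decrypt_monoalphabetic
  rw [A_eq_join]
  unfold decrypt_monoalphabetic_alt
  show _ = String.join (text.toList.map _)
  congr 1
  apply List.map_congr_left
  intro c _
  exact pvBuild key PySem.Dict.empty PySem.Dict.empty pvBase c
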